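-- pv_equiv track=rewrite | github.com/liushiliushi/JitRL | WebArena/test_webarena_lite.py | group_tasks_by_intent_template
-- ===== SOURCE A (Python) =====
-- def group_tasks_by_intent_template(task_ids, metadata):
--     """Group tasks by site and consecutive task IDs for scheduling.
--
--     Tasks are first grouped by site, then within each site they are grouped into
--     consecutive ranges (e.g., 0-6, 11-15, 41-43).
--
--     Tasks within the same group must run serially.
--     Tasks in different groups can run in parallel.
--
--     Args:
--         task_ids: List of task IDs
--         metadata: Task metadata from get_task_metadata()
--
--     Returns:
--         list: List of groups, where each group is a list of consecutive task IDs from the same site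
--     """
--     from collections import defaultdict
--
--     # Group tasks by site (using the first site if multiple)
--     site_tasks = defaultdict(list)
--     for tid in sorted(task_ids):
--         sites = metadata.get(tid, {}).get('sites', [])
--         site = sites[0] if sites else 'unknown'
--         site_tasks[site].append(tid)
--
--     # For each site, group consecutive task IDs
--     groups = []
--     for site in sorted(site_tasks.keys()):
--         task_list = sorted(site_tasks[site])
--
--         # Group consecutive task IDs
--         if not task_list:
--             continue
--
--         current_group = [task_list[0]]
--         for i in range(1, len(task_list)):
--             if task_list[i] == task_list[i-1] + 1:
--                 # Consecutive, add to current group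
--                 current_group.append(task_list[i])
--             else:
--                 # Not consecutive, start a new group
--                 groups.append(current_group)
--                 current_group = [task_list[i]]
--
--         # Don't forget the last group
--         if current_group:
--             groups.append(current_group)
--
--     return groups
-- ===== SOURCE B (Python) =====
-- def group_tasks_by_intent_template(task_ids, metadata):
--     """Group tasks by site and consecutive task IDs (single fused pass over
--     the lexicographically sorted (site, task-id) pairs; no dict of lists)."""
--     def site_of(tid):
--         sites = metadata.get(tid, {}).get('sites', [])
--         return sites[0] if sites else 'unknown'
--
--     groups = []
--     prev = None
--     for site, tid in sorted((site_of(t), t) for t in task_ids):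
--         if prev is not None and prev[0] == site and tid == prev[1] + 1:
--             groups[-1].append(tid)
--         else:
--             groups.append([tid])
--         prev = (site, tid)
--     return groups
-- ===== Notes on version B (the rewrite author's own statement) =====
-- stated objective: simpler
-- what changed: A accumulates a defaultdict of per-site id lists and then runs a manual index-based neighbour-comparison loop per site; B makes one fused pass over the lexicographically sorted (site, id) pairs, starting a new group whenever the site changes or the id is not the predecessor's successor.
import Mathlib
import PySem

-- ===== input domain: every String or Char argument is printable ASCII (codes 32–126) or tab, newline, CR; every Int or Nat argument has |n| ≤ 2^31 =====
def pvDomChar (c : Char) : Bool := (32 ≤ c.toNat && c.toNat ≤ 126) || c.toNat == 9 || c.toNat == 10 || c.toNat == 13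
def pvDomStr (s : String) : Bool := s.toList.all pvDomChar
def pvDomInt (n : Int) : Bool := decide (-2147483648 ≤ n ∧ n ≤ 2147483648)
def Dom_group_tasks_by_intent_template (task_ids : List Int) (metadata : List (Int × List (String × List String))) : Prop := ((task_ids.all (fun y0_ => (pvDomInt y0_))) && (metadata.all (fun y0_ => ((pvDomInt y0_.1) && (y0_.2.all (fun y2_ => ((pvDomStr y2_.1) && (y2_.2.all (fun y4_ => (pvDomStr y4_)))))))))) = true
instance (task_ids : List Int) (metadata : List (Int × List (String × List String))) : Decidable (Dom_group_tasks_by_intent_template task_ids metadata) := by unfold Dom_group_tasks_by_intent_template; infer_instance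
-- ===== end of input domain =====

-- B replaces A's defaultdict-of-lists plus per-site index-based neighbour loop by one fused pass
-- over the lexicographically sorted (site, task-id) pairs (objective: simpler).

-- ===== PORT A =====
-- sites = metadata.get(tid, {}).get('sites', []); site = sites[0] if sites else 'unknown'
def pvSiteA (metadata : List (Int × List (String × List String))) (tid : Int) : String :=
  let sites := (PySem.Dict.mk ((PySem.Dict.mk metadata).getD tid [])).getD "sites" []
  match sites with
  | [] => "unknown"
  | s :: _ => s

def group_tasks_by_intent_template (task_ids : List Int) (metadata : List (Int × List (String × List String))) : List (List Int) :=
  -- site_tasks = defaultdict(list); for tid in sorted(task_ids): site_tasks[site].append(tid)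
  let site_tasks : PySem.Dict String (List Int) :=
    (PySem.List.sorted task_ids (fun x => x) false).foldl
      (fun d tid => d.modify (pvSiteA metadata tid) [] (fun l => l ++ [tid])) PySem.Dict.empty
  -- for site in sorted(site_tasks.keys()): …
  (PySem.List.sorted site_tasks.keys (fun s => s) false).foldl
    (fun groups site =>
      let task_list := PySem.List.sorted (site_tasks.getD site []) (fun x => x) false
      match task_list with
      | [] => groups                     -- if not task_list: continue
      | t0 :: _ =>
        -- current_group = [task_list[0]]; for i in range(1, len(task_list)): …
        let res := (PySem.List.pyRange 1 (PySem.List.len task_list) 1).foldl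
          (fun (st : List (List Int) × List Int) i =>
            if PySem.List.pyGetD task_list i 0 == PySem.List.pyGetD task_list (i - 1) 0 + 1 then
              (st.1, st.2 ++ [PySem.List.pyGetD task_list i 0])
            else
              (st.1 ++ [st.2], [PySem.List.pyGetD task_list i 0]))
          (groups, [t0])
        if res.2 ≠ [] then res.1 ++ [res.2] else res.1) []   -- if current_group: groups.append(…)

-- ===== PORT B =====
-- B's nested helper site_of
def pvSiteB (metadata : List (Int × List (String × List String))) (tid : Int) : String :=
  let sites := (PySem.Dict.mk ((PySem.Dict.mk metadata).getD tid [])).getD "sites" []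
  match sites with
  | [] => "unknown"
  | s :: _ => s

-- groups[-1].append(t)  (only invoked on a non-empty groups list)
def pvAppendLast (gs : List (List Int)) (t : Int) : List (List Int) :=
  gs.dropLast ++ [gs.getLastD [] ++ [t]]

def group_tasks_by_intent_template_alt (task_ids : List Int) (metadata : List (Int × List (String × List String))) : List (List Int) :=
  -- sorted((site_of(t), t) for t in task_ids)   (Python tuple comparison = lexicographic)
  let pairs := PySem.List.sorted2 (task_ids.map (fun t => (pvSiteB metadata t, t))) Prod.fst Prod.snd
  (pairs.foldl
    (fun (st : List (List Int) × Option (String × Int)) p =>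
      match st.2 with
      | some pr =>
        if pr.1 == p.1 && p.2 == pr.2 + 1 then (pvAppendLast st.1 p.2, some p)
        else (st.1 ++ [[p.2]], some p)
      | none => (st.1 ++ [[p.2]], some p))
    ([], none)).1

-- ===== PRECONDITION & SPEC =====
def Spec_group_tasks_by_intent_template (task_ids : List Int) (metadata : List (Int × List (String × List String))) (out : List (List Int)) : Prop := out = group_tasks_by_intent_template_alt task_ids metadata
instance (task_ids : List Int) (metadata : List (Int × List (String × List String))) (out : List (List Int)) : Decidable (Spec_group_tasks_by_intent_template task_ids metadata out) := by unfold Spec_group_tasks_by_intent_template; infer_instance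

-- ===== CLAIM (what is proved, stated in full; the proofs are below) =====
def Claim_equal_group_tasks_by_intent_template : Prop := ∀ (task_ids : List Int) (metadata : List (Int × List (String × List String))), Dom_group_tasks_by_intent_template task_ids metadata → Spec_group_tasks_by_intent_template task_ids metadata (group_tasks_by_intent_template task_ids metadata)

-- ===== LEMMAS AND PROOFS =====

-- A's per-element step, on (previous element, current element) pairs
def pvStepV (st : List (List Int) × List Int) (p : Int × Int) : List (List Int) × List Int :=
  if p.2 == p.1 + 1 then (st.1, st.2 ++ [p.2]) else (st.1 ++ [st.2], [p.2])

-- B's per-element step (the loop body of the port of B)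
def pvStepB (st : List (List Int) × Option (String × Int)) (p : String × Int) :
    List (List Int) × Option (String × Int) :=
  match st.2 with
  | some pr =>
    if pr.1 == p.1 && p.2 == pr.2 + 1 then (pvAppendLast st.1 p.2, some p)
    else (st.1 ++ [[p.2]], some p)
  | none => (st.1 ++ [[p.2]], some p)

-- A's whole per-site body, re-expressed on (prev, cur) pairs
def pvProcA (g : List (List Int)) (L : List Int) : List (List Int) :=
  match L with
  | [] => g
  | t0 :: rest =>
      let r := (L.zip rest).foldl pvStepV (g, [t0])
      r.1 ++ [r.2]

theorem pvSiteB_eq : pvSiteB = pvSiteA := rfl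

theorem lem_zip_shift (L : List Int) :
    L.zip L.tail = (List.range (L.length - 1)).map (fun k => (L.getD k 0, L.getD (k+1) 0)) := by
  apply List.ext_getElem
  · simp [List.length_tail]
  · intro k h1 h2
    simp only [List.length_zip, List.length_tail] at h1
    simp [List.getElem_zip, List.getElem_tail, List.getD_eq_getElem?_getD,
      List.getElem?_eq_getElem (l := L) (by omega : k < L.length),
      List.getElem?_eq_getElem (l := L) (by omega : k + 1 < L.length)]

theorem lem_cur_ne (ps : List (Int × Int)) (g : List (List Int)) (cur : List Int) (h : cur ≠ []) :
    (ps.foldl pvStepV (g, cur)).2 ≠ [] := by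
  induction ps generalizing g cur with
  | nil => simpa using h
  | cons p ps ih =>
      simp only [List.foldl_cons, pvStepV]
      split <;> apply ih <;> simp

-- A's index loop over range(1, len) is the fold of pvStepV over the (prev, cur) zip
theorem lem_inner (L : List Int) (t0 : Int) (rest : List Int) (hL : L = t0 :: rest) (g : List (List Int)) :
    (PySem.List.pyRange 1 (PySem.List.len L) 1).foldl
      (fun (st : List (List Int) × List Int) i =>
        if PySem.List.pyGetD L i 0 == PySem.List.pyGetD L (i - 1) 0 + 1 then
          (st.1, st.2 ++ [PySem.List.pyGetD L i 0])
        else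
          (st.1 ++ [st.2], [PySem.List.pyGetD L i 0]))
      (g, [t0])
    = (L.zip rest).foldl pvStepV (g, [t0]) := by
  have htail : L.tail = rest := by rw [hL]; rfl
  rw [← htail, lem_zip_shift, List.foldl_map]
  rw [PySem.List.len_eq, PySem.List.pyRange_one, List.foldl_map]
  have hlen : (((L.length : Int)) - 1).toNat = L.length - 1 := by omega
  rw [hlen]
  apply PySem.List.foldl_congr_mem
  intro st k hk
  simp only [List.mem_range] at hk
  have h1 : (1 : Int) + k = ((k + 1 : Nat) : Int) := by push_cast; ring
  rw [h1]
  simp only [PySem.List.pyGetD_natCast, pvStepV]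
  have h3 : ((k + 1 : Nat) : Int) - 1 = ((k : Nat) : Int) := by push_cast; ring
  rw [h3]
  simp only [PySem.List.pyGetD_natCast]

theorem lem_dict_keys (metadata : List (Int × List (String × List String))) (s : List Int) :
    (s.foldl (fun d tid => d.modify (pvSiteA metadata tid) [] (fun l => l ++ [tid])) PySem.Dict.empty).keys
      = PySem.Set.ofList (s.map (pvSiteA metadata)) := by
  rw [PySem.Dict.keys_foldl_modify_key s (pvSiteA metadata) [] (fun _ tid => (fun l => l ++ [tid]))]
  rfl

theorem lem_dict_getD (metadata : List (Int × List (String × List String))) (s : List Int) (c : String) :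
    (s.foldl (fun d tid => d.modify (pvSiteA metadata tid) [] (fun l => l ++ [tid])) PySem.Dict.empty).getD c []
      = s.filter (fun t => pvSiteA metadata t == c) := by
  have h1 : s.foldl (fun d tid => d.modify (pvSiteA metadata tid) [] (fun l => l ++ [tid])) PySem.Dict.empty
      = (s.map (fun t => (pvSiteA metadata t, t))).foldl (fun d p => d.modify p.1 [] (fun l => l ++ [p.2])) PySem.Dict.empty := by
    rw [List.foldl_map]
  rw [h1, PySem.Dict.getD_foldl_modify_append, PySem.Dict.getD_empty, List.filter_map]
  simp [Function.comp_def]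

-- Python's sorted on (String, Int) tuples is sorting by the lexicographic key
theorem lem_sorted2_lex (xs : List (String × Int)) :
    PySem.List.sorted2 xs Prod.fst Prod.snd = PySem.List.sorted xs (fun p => toLex p : String × Int → String ×ₗ Int) := by
  have h : (fun (a b : String × Int) => decide (a.1 < b.1) || (!decide (b.1 < a.1) && decide (a.2 < b.2)))
      = (fun a b => decide ((toLex a : String ×ₗ Int) < toLex b)) := by
    funext a b
    rcases lt_trichotomy a.1 b.1 with h1 | h1 | h1
    · simp [Prod.Lex.toLex_lt_toLex, h1]
    · simp [Prod.Lex.toLex_lt_toLex, h1]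
    · simp [Prod.Lex.toLex_lt_toLex, h1, lt_asymm h1, ne_of_gt h1]
  rw [PySem.List.sorted_eq_foldl_insertBy]
  show List.foldl (fun acc x => PySem.List.insertBy ((fun (a b : String × Int) => decide (a.1 < b.1) || (!decide (b.1 < a.1) && decide (a.2 < b.2)))) x acc) [] xs = _
  rw [h]

theorem lem_count_flatMap (K : List String) (F : String → List Int) (a : Int) :
    (K.flatMap F).count a = (K.map (fun c => (F c).count a)).sum := by
  induction K with
  | nil => simp
  | cons c K ih => simp [List.count_append, ih]

theorem lem_sum_ite_mem (K : List String) (b : String) (n : Nat) (hnd : K.Nodup) :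
    (K.map (fun c => if b = c then n else 0)).sum = if b ∈ K then n else 0 := by
  induction K with
  | nil => simp
  | cons c K ih =>
      rcases List.nodup_cons.mp hnd with ⟨hc, hnd'⟩
      by_cases hb : b = c
      · subst hb
        simp [ih hnd', hc]
      · simp [hb, ih hnd']

-- the per-site filters of s, concatenated over the distinct sites, are a permutation of s
theorem lem_partition_perm (f : Int → String) (s : List Int) (K : List String)
    (hnd : K.Nodup) (hmem : ∀ t ∈ s, f t ∈ K) :
    (K.flatMap (fun c => s.filter (fun t => f t == c))).Perm s := by
  rw [List.perm_iff_count]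
  intro a
  rw [lem_count_flatMap]
  have h1 : ∀ c, (s.filter (fun t => f t == c)).count a = if f a = c then s.count a else 0 := by
    intro c
    by_cases h : f a = c
    · rw [List.count_filter (by simp [h])]
      simp [h]
    · simp only [h, if_false]
      rw [List.count_eq_zero]
      intro hmemf
      exact h (by simpa using (List.mem_filter.mp hmemf).2)
  simp only [h1]
  rw [lem_sum_ite_mem K (f a) (s.count a) hnd]
  by_cases ha : a ∈ s
  · simp [hmem a ha]
  · simp [List.count_eq_zero.mpr ha]

theorem lem_block_eq (f : Int → String) (s : List Int) (c : String) :
    (s.filter (fun t => f t == c)).map (fun t => (f t, t))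
      = (s.filter (fun t => f t == c)).map (fun t => (c, t)) := by
  apply List.map_congr_left
  intro t ht
  have := (List.mem_filter.mp ht).2
  simp at this
  simp [this]

-- the blockwise list is lexicographically ordered
theorem lem_T_pairwise (f : Int → String) (s : List Int) (K : List String)
    (hs : s.Pairwise (fun a b : Int => a ≤ b)) (hK : K.Pairwise (· < ·)) :
    (K.flatMap (fun c => (s.filter (fun t => f t == c)).map (fun t => (c, t)))).Pairwise
      (fun a b : String × Int => (toLex a : String ×ₗ Int) ≤ toLex b) := by
  induction K with
  | nil => simp
  | cons c K ih =>
      rw [List.flatMap_cons, List.pairwise_append]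
      refine ⟨?_, ih (List.pairwise_cons.mp hK).2, ?_⟩
      · rw [List.pairwise_map]
        exact (hs.filter _).imp (fun hab => by
          rw [Prod.Lex.toLex_le_toLex]
          exact Or.inr ⟨rfl, hab⟩)
      · intro a ha b hb
        rcases List.mem_map.mp ha with ⟨t, _, rfl⟩
        rcases List.mem_flatMap.mp hb with ⟨c', hc', hb'⟩
        rcases List.mem_map.mp hb' with ⟨t', _, rfl⟩
        rw [Prod.Lex.toLex_le_toLex]
        exact Or.inl ((List.pairwise_cons.mp hK).1 c' hc')

-- B's fold over one site's block, given the previous element's site differs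
theorem lem_segment (c : String) (rest : List Int) (tprev : Int) (gs : List (List Int)) (cur : List Int)
    (hcur : cur ≠ []) :
    (rest.map (fun t => (c, t))).foldl pvStepB (gs ++ [cur], some (c, tprev))
      = (let r := ((tprev :: rest).zip rest).foldl pvStepV (gs, cur)
         (r.1 ++ [r.2], some (c, rest.getLastD tprev))) := by
  induction rest generalizing tprev gs cur with
  | nil => simp
  | cons t rest ih =>
      simp only [List.map_cons, List.foldl_cons, List.zip_cons_cons, pvStepB, pvStepV]
      by_cases h : t = tprev + 1
      · rw [if_pos (by simp [h]), if_pos (by simp [h])]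
        have happ : pvAppendLast (gs ++ [cur]) t = gs ++ [cur ++ [t]] := by
          simp [pvAppendLast]
        rw [happ, ih t gs (cur ++ [t]) (by simp), List.getLastD_cons]
      · rw [if_neg (by simp [h]), if_neg (by simpa using h)]
        rw [ih t (gs ++ [cur]) [t] (by simp), List.getLastD_cons]

-- B's fold over the whole blockwise list is A's per-site loop, site by site
theorem lem_whole (f : Int → String) (s : List Int) :
    ∀ (K : List String) (gs : List (List Int)) (prevOpt : Option (String × Int)),
      K.Pairwise (· < ·) →
      (∀ pr, prevOpt = some pr → ∀ c ∈ K, pr.1 ≠ c) →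
      ((K.flatMap (fun c => (s.filter (fun t => f t == c)).map (fun t => (c, t)))).foldl
          pvStepB (gs, prevOpt)).1
        = K.foldl (fun g c => pvProcA g (s.filter (fun t => f t == c))) gs := by
  intro K
  induction K with
  | nil => intro gs prevOpt _ _; simp
  | cons c K ih =>
      intro gs prevOpt hK hinv
      rw [List.flatMap_cons, List.foldl_append, List.foldl_cons]
      rcases List.pairwise_cons.mp hK with ⟨hcK, hK'⟩
      cases hLc : s.filter (fun t => f t == c) with
      | nil =>
          simp only [List.map_nil, List.foldl_nil, pvProcA]
          exact ih gs prevOpt hK' (fun pr hpr c' hc' => hinv pr hpr c' (List.mem_cons_of_mem _ hc'))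
      | cons t0 rest =>
          have hfirst : ∀ prevOpt, (∀ pr, prevOpt = some pr → pr.1 ≠ c) →
              pvStepB (gs, prevOpt) (c, t0) = (gs ++ [[t0]], some (c, t0)) := by
            intro prevOpt hpr
            cases prevOpt with
            | none => rfl
            | some pr =>
                simp only [pvStepB]
                rw [if_neg (by simp [hpr pr rfl])]
          rw [List.map_cons, List.foldl_cons,
            hfirst prevOpt (fun pr hpr => hinv pr hpr c (List.mem_cons_self))]
          rw [lem_segment c rest t0 gs [t0] (by simp)]
          simp only []
          rw [ih _ _ hK' (fun pr hpr c' hc' => by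
            cases hpr
            exact ne_of_lt (hcK c' hc'))]
          simp only [pvProcA]

-- ===== VERDICT (by name: the statement is the Claim_ definition above) =====
theorem group_tasks_by_intent_template_spec : Claim_equal_group_tasks_by_intent_template := by
  intro task_ids metadata _
  unfold Spec_group_tasks_by_intent_template
  set f := pvSiteA metadata with hf
  set s := PySem.List.sorted task_ids (fun x => x) false with hs
  have hsp : s.Pairwise (fun a b : Int => a ≤ b) := PySem.List.sorted_pairwise task_ids (fun x => x)
  set K := PySem.List.sorted (PySem.Set.ofList (s.map f)) (fun c => c) false with hK
  have hndK : K.Nodup :=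
    (PySem.List.sorted_perm _ _ _).nodup_iff.mpr (PySem.Set.nodup_ofList _)
  have hKle : K.Pairwise (fun a b : String => a ≤ b) := PySem.List.sorted_pairwise _ _
  have hKlt : K.Pairwise (· < ·) := (hKle.and hndK).imp (fun h => lt_of_le_of_ne h.1 h.2)
  have hKmem : ∀ c, c ∈ K ↔ c ∈ s.map f := by
    intro c
    rw [hK, PySem.List.mem_sorted, PySem.Set.mem_ofList]
  -- the A side
  have hA : group_tasks_by_intent_template task_ids metadata
      = K.foldl (fun g c => pvProcA g (s.filter (fun t => f t == c))) [] := by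
    unfold group_tasks_by_intent_template
    dsimp only
    rw [← hs, lem_dict_keys metadata s, ← hf]
    apply PySem.List.foldl_congr_mem
    intro g c _
    rw [lem_dict_getD metadata s c, ← hf]
    rw [PySem.List.sorted_eq_self_of_pairwise _ _ (hsp.filter _)]
    cases hLc : s.filter (fun t => f t == c) with
    | nil => rfl
    | cons t0 rest =>
        simp only []
        rw [lem_inner (t0 :: rest) t0 rest rfl g]
        rw [if_pos (lem_cur_ne _ _ _ (by simp))]
        simp [pvProcA]
  -- the B side
  have hB : group_tasks_by_intent_template_alt task_ids metadata
      = ((K.flatMap (fun c => (s.filter (fun t => f t == c)).map (fun t => (c, t)))).foldl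
          pvStepB ([], none)).1 := by
    unfold group_tasks_by_intent_template_alt
    rw [pvSiteB_eq, ← hf, lem_sorted2_lex]
    have hperm : (K.flatMap (fun c => (s.filter (fun t => f t == c)).map (fun t => (c, t)))).Perm
        (task_ids.map (fun t => (f t, t))) := by
      have h1 : K.flatMap (fun c => (s.filter (fun t => f t == c)).map (fun t => (c, t)))
          = (K.flatMap (fun c => s.filter (fun t => f t == c))).map (fun t => (f t, t)) := by
        rw [List.map_flatMap]
        simp only [lem_block_eq f s]
      rw [h1]
      refine ((lem_partition_perm f s K hndK ?_).map _).trans ?_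
      · intro t ht
        exact (hKmem (f t)).mpr (List.mem_map_of_mem ht)
      · exact (PySem.List.sorted_perm task_ids (fun x => x) false).map _
    have hsorted : PySem.List.sorted (task_ids.map (fun t => (f t, t)))
          (fun p => toLex p : String × Int → String ×ₗ Int)
        = K.flatMap (fun c => (s.filter (fun t => f t == c)).map (fun t => (c, t))) := by
      rw [PySem.List.sorted_eq_sorted_of_perm (key := fun p => (toLex p : String ×ₗ Int)) _ _ (fun a b h => h) hperm.symm]
      exact PySem.List.sorted_eq_self_of_pairwise _ _ (lem_T_pairwise f s K hsp hKlt)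
    rw [hsorted]
    rfl
  rw [hA, hB, lem_whole f s K [] none hKlt (by intro pr hpr; cases hpr)]
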